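-- pv_equiv track=rewrite | github.com/worldyone/workspace | AtCoder/ABC138/e.py | func
-- ===== SOURCE A (Python) =====
-- def func(S, T):
--
--     S_2 = S+S
--     len_s = len(S)
--     merge_S = list(set(S))
--     merge_T = list(set(T))
--
--     for t in merge_T:
--         if t not in merge_S:
--             return -1
--
--     alp2num = {t: merge_T.index(t) for t in merge_T}
--     dis_S = [[-1]*len(merge_T) for _ in range(len_s)]
--     pt = S.index(T[0])
--     ans = pt+1
--
--     for t in T[1:]:
--         it = alp2num[t]
--         if dis_S[pt][it] == -1:
--             dis_S[pt][it] = S_2[pt+1:].index(t) + 1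
--         ans += dis_S[pt][it]
--         pt = (pt + dis_S[pt][it]) % len_s
--
--     return ans
-- ===== SOURCE B (Python) =====
-- def func(S, T):
--     n = len(S)
--     pos = {}
--     for i, c in enumerate(S):
--         pos.setdefault(c, []).append(i)
--     for c in T:
--         if c not in pos:
--             return -1
--     pt = pos[T[0]][0]
--     ans = pt + 1
--     for c in T[1:]:
--         lst = pos[c]
--         # binary search: first index with lst[idx] > pt
--         lo, hi = 0, len(lst)
--         while lo < hi:
--             mid = (lo + hi) // 2
--             if lst[mid] > pt:
--                 hi = mid
--             else:
--                 lo = mid + 1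
--         if lo < len(lst):
--             q = lst[lo]
--             ans += q - pt
--             pt = q
--         else:
--             q = lst[0]
--             ans += n - pt + q
--             pt = q
--     return ans
-- ===== Notes on version B (the rewrite author's own statement) =====
-- stated objective: faster
-- what changed: A memoises linear scans of S+S in a |S| x |alphabet| distance table; B instead builds one position list per character and finds the next occurrence after the current pointer by binary search, so no linear scan of S+S is ever made.
-- outside the precondition, e.g. on func('ab', ''): A raises IndexError, B raises IndexError
import Mathlib
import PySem

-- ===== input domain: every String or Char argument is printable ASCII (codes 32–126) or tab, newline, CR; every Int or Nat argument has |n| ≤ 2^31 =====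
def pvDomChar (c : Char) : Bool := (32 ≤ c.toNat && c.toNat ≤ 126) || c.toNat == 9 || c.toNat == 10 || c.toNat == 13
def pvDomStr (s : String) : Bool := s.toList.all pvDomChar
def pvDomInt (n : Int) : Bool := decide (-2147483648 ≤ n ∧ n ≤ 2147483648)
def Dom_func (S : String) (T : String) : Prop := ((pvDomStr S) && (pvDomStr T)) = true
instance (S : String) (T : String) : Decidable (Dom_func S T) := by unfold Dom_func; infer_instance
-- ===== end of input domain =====

-- B replaces A's memoised scan of S+S (quadratic in |S| in the worst case) by per-character
-- sorted position lists with a hand-written binary search for the next occurrence.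

-- ===== PORT A =====
def func (S : String) (T : String) : Int :=
  let s := S.toList
  let t := T.toList
  let s2 := s ++ s
  let lenS := s.length
  let mergeS : PySem.Set Char := PySem.Set.ofList s
  let mergeT : PySem.Set Char := PySem.Set.ofList t
  if mergeT.any (fun c => !(PySem.Set.contains mergeS c)) then -1
  else
    let alp2num : PySem.Dict Char Nat :=
      PySem.Dict.ofList (mergeT.map (fun c => (c, (PySem.List.index? mergeT c).getD 0)))
    let disS : List (List Int) := List.replicate lenS (List.replicate mergeT.length (-1))
    -- T[0] / S.index raise on empty T (excluded by Pre_); the getD defaults below are never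
    -- reached on inputs satisfying Pre_
    let pt : Nat := (PySem.List.index? s (t.headD ' ')).getD 0
    let ans : Int := (pt : Int) + 1
    let r := (t.drop 1).foldl (fun (st : List (List Int) × Nat × Int) c =>
      let it : Nat := alp2num.getD c 0
      let row := st.1.getD st.2.1 []
      let d0 := row.getD it (-1)
      let d : Int := if d0 == -1 then ((PySem.List.index? (s2.drop (st.2.1 + 1)) c).getD 0 : Int) + 1 else d0
      (st.1.set st.2.1 (row.set it d), (st.2.1 + d.toNat) % lenS, st.2.2 + d)) (disS, pt, ans)
    r.2.2

-- ===== PORT B =====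
-- B's dict of per-character position lists (the first Python loop of Source B)
def buildPos (s : List Char) : PySem.Dict Char (List Nat) :=
  s.zipIdx.foldl (fun d p => d.modify p.1 [] (fun l => l ++ [p.2])) PySem.Dict.empty

-- B's hand-written binary search (the while loop of Source B): first index k in [lo,hi) with lst[k] > x
def bsearchGT (lst : List Nat) (x : Nat) (lo hi : Nat) : Nat :=
  if lo < hi then
    if x < lst.getD ((lo + hi) / 2) 0 then bsearchGT lst x lo ((lo + hi) / 2)
    else bsearchGT lst x ((lo + hi) / 2 + 1) hi
  else lo
  termination_by hi - lo
  decreasing_by all_goals omega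

def func_alt (S : String) (T : String) : Int :=
  let s := S.toList
  let t := T.toList
  let n := s.length
  let pos := buildPos s
  if t.any (fun c => !(pos.contains c)) then -1
  else
    match t with
    | [] => 0  -- Python B raises IndexError here (T[0]); excluded by Pre_
    | c0 :: rest =>
      let pt0 := (pos.getD c0 []).headD 0
      let r := rest.foldl (fun (st : Nat × Int) c =>
        let lst := pos.getD c []
        let k := bsearchGT lst st.1 0 lst.length
        if k < lst.length then
          (lst.getD k 0, st.2 + ((lst.getD k 0 : Int) - (st.1 : Int)))
        else
          (lst.headD 0, st.2 + ((n : Int) - (st.1 : Int) + (lst.headD 0 : Int)))) (pt0, (pt0 : Int) + 1)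
      r.2

-- ===== PRECONDITION & SPEC =====
-- Pre_ excludes only empty T, on which both A and B raise IndexError (A at S.index(T[0]), B at pos[T[0]]).
def Pre_func (S : String) (T : String) : Prop := T ≠ ""
instance (S : String) (T : String) : Decidable (Pre_func S T) := by unfold Pre_func; infer_instance
def pvWitness_func : String × String := ("aba", "baab")

def Spec_func (S : String) (T : String) (out : Int) : Prop := out = func_alt S T
instance (S : String) (T : String) (out : Int) : Decidable (Spec_func S T out) := by unfold Spec_func; infer_instance

-- ===== CLAIM (what is proved, stated in full; the proofs are below) =====
def Claim_equal_func : Prop := ∀ (S : String) (T : String), Dom_func S T → Pre_func S T → Spec_func S T (func S T)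

-- ===== LEMMAS AND PROOFS =====

-- the list of positions of c in s, in increasing order
def occ (s : List Char) (c : Char) : List Nat :=
  (s.zipIdx.filter (fun p => p.1 == c)).map (fun p => p.2)

-- the distance A computes: 1 + first index of c in (s++s)[pt+1:]
def dA (s : List Char) (pt : Nat) (c : Char) : Int :=
  ((PySem.List.index? ((s ++ s).drop (pt + 1)) c).getD 0 : Int) + 1

-- the common mathematical step both loops perform on (pt, ans)
def stepP (s : List Char) (st : Nat × Int) (c : Char) : Nat × Int :=
  ((st.1 + (dA s st.1 c).toNat) % s.length, st.2 + dA s st.1 c)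

lemma getD_buildPos (s : List Char) (c : Char) : (buildPos s).getD c [] = occ s c := by
  unfold buildPos occ
  rw [PySem.Dict.getD_foldl_modify_append]
  simp

lemma mem_occ (s : List Char) (c : Char) (i : Nat) :
    i ∈ occ s c ↔ ∃ h : i < s.length, s[i] = c := by
  unfold occ
  simp only [List.mem_map, List.mem_filter]
  constructor
  · rintro ⟨⟨a, i0⟩, ⟨hmem, heq⟩, rfl⟩
    obtain ⟨m, hm, hget⟩ := List.mem_iff_getElem.mp hmem
    rw [List.getElem_zipIdx] at hget
    have hm' : m < s.length := by simpa using hm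
    simp only [Prod.mk.injEq] at hget
    simp only at heq
    have hac : a = c := by simpa using heq
    subst hac
    have : i0 = m := by omega
    subst this
    exact ⟨by omega, hget.1⟩
  · rintro ⟨h, hc⟩
    refine ⟨(c, i), ⟨?_, by simp⟩, rfl⟩
    have hz : i < s.zipIdx.length := by simpa [List.length_zipIdx]
    have : s.zipIdx[i] = (c, i) := by
      rw [List.getElem_zipIdx]; simp [hc]
    exact this ▸ List.getElem_mem hz

lemma occ_sorted (s : List Char) (c : Char) : (occ s c).Pairwise (· < ·) := by
  unfold occ
  rw [List.pairwise_map]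
  have hz : s.zipIdx.Pairwise (fun p q => p.2 < q.2) := by
    rw [List.pairwise_iff_getElem]
    intro i j hi hj hij
    rw [List.getElem_zipIdx, List.getElem_zipIdx]
    simpa using hij
  exact List.Pairwise.sublist (List.filter_sublist) hz

lemma occ_ne_nil (s : List Char) (c : Char) (hc : c ∈ s) : occ s c ≠ [] := by
  obtain ⟨i, hi, hci⟩ := List.mem_iff_getElem.mp hc
  exact List.ne_nil_of_mem ((mem_occ s c i).mpr ⟨hi, hci⟩)

lemma occ_head_le (s : List Char) (c : Char) (i : Nat) (hi : i ∈ occ s c) :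
    (occ s c).headD 0 ≤ i := by
  have hs := occ_sorted s c
  cases h : occ s c with
  | nil => rw [h] at hi; cases hi
  | cons a tl =>
    rw [h] at hi hs
    simp only [List.headD_cons]
    rcases List.mem_cons.mp hi with rfl | hmem
    · exact le_refl _
    · exact Nat.le_of_lt ((List.pairwise_cons.mp hs).1 _ hmem)

lemma occ_head_mem (s : List Char) (c : Char) (hc : c ∈ s) : (occ s c).headD 0 ∈ occ s c := by
  have hne := occ_ne_nil s c hc
  cases h : occ s c with
  | nil => exact absurd h hne
  | cons a tl => simp

lemma index?_getD_eq_head_occ (s : List Char) (c : Char) (hc : c ∈ s) :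
    (PySem.List.index? s c).getD 0 = (occ s c).headD 0 := by
  have hsome : (PySem.List.index? s c).isSome := (PySem.List.index?_isSome_iff s c).mpr hc
  obtain ⟨k, hk⟩ := Option.isSome_iff_exists.mp hsome
  obtain ⟨hklt, hkc, hmin⟩ := PySem.List.getElem_of_index?_eq_some hk
  have hkocc : k ∈ occ s c := (mem_occ s c k).mpr ⟨hklt, hkc⟩
  have h1 : (occ s c).headD 0 ≤ k := occ_head_le s c k hkocc
  obtain ⟨hhl, hhc⟩ := (mem_occ s c _).mp (occ_head_mem s c hc)
  have h2 : ¬ ((occ s c).headD 0 < k) := fun hlt => hmin _ hlt hhc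
  have heq : (occ s c).headD 0 = k := by omega
  rw [hk, heq]
  rfl

lemma index?_append_of_not_mem {l : List Char} (t : List Char) {v : Char} (h : v ∉ l) :
    PySem.List.index? (l ++ t) v = (PySem.List.index? t v).map (· + l.length) := by
  induction l with
  | nil => simp [Option.map_id']
  | cons x l ih =>
    have hx : x ≠ v := fun hxv => h (hxv ▸ List.mem_cons_self ..)
    have hnl : v ∉ l := fun hm => h (List.mem_cons_of_mem _ hm)
    rw [List.cons_append, PySem.List.index?_cons_of_ne (l ++ t) hx, ih hnl]
    cases PySem.List.index? t v with
    | none => rfl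
    | some k => simp only [Option.map_some, List.length_cons]; congr 1

lemma occ_getD_mono (s : List Char) (c : Char) (i j : Nat) (hij : i ≤ j)
    (hj : j < (occ s c).length) : (occ s c).getD i 0 ≤ (occ s c).getD j 0 := by
  rcases Nat.eq_or_lt_of_le hij with rfl | hlt
  · exact le_refl _
  · have hi : i < (occ s c).length := lt_of_le_of_lt hij hj
    rw [List.getD_eq_getElem _ _ hi, List.getD_eq_getElem _ _ hj]
    exact Nat.le_of_lt (List.pairwise_iff_getElem.mp (occ_sorted s c) i j hi hj hlt)

lemma bsearchGT_spec (lst : List Nat) (x : Nat)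
    (mono : ∀ i j, i ≤ j → j < lst.length → lst.getD i 0 ≤ lst.getD j 0) :
    ∀ fuel lo hi, hi - lo ≤ fuel → lo ≤ hi → hi ≤ lst.length →
    (∀ i, i < lo → lst.getD i 0 ≤ x) →
    (∀ i, hi ≤ i → i < lst.length → x < lst.getD i 0) →
    lo ≤ bsearchGT lst x lo hi ∧ bsearchGT lst x lo hi ≤ hi ∧
      (∀ i, i < bsearchGT lst x lo hi → lst.getD i 0 ≤ x) ∧
      (∀ i, bsearchGT lst x lo hi ≤ i → i < lst.length → x < lst.getD i 0) := by
  intro fuel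
  induction fuel with
  | zero =>
    intro lo hi hf hle hhi hlow hhigh
    rw [bsearchGT]
    simp only [show ¬ lo < hi by omega, if_false]
    exact ⟨le_refl _, by omega, hlow, fun i h1 h2 => hhigh i (by omega) h2⟩
  | succ f ih =>
    intro lo hi hf hle hhi hlow hhigh
    rw [bsearchGT]
    by_cases hlt : lo < hi
    · simp only [if_pos hlt]
      have hmidlt : (lo + hi) / 2 < hi := by omega
      have hmidlen : (lo + hi) / 2 < lst.length := by omega
      by_cases hx : x < lst.getD ((lo + hi) / 2) 0
      · simp only [if_pos hx]
        have hr := ih lo ((lo + hi) / 2) (by omega) (by omega) (by omega) hlow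
          (fun i h1 h2 => lt_of_lt_of_le hx (mono _ _ h1 h2))
        exact ⟨hr.1, le_trans hr.2.1 (by omega), hr.2.2.1, hr.2.2.2⟩
      · simp only [if_neg hx]
        have hxle : lst.getD ((lo + hi) / 2) 0 ≤ x := by omega
        have hr := ih ((lo + hi) / 2 + 1) hi (by omega) (by omega) hhi
          (fun i h1 => le_trans (mono i ((lo + hi) / 2) (by omega) hmidlen) hxle) hhigh
        exact ⟨le_trans (by omega) hr.1, hr.2.1, hr.2.2.1, hr.2.2.2⟩
    · simp only [if_neg hlt]
      exact ⟨le_refl _, by omega, hlow, fun i h1 h2 => hhigh i (by omega) h2⟩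

lemma index?_eq_some_of_first (l : List Char) (c : Char) (k : Nat) (hk : k < l.length)
    (hc : l[k]'hk = c) (hmin : ∀ j (hj : j < l.length), j < k → l[j]'hj ≠ c) :
    PySem.List.index? l c = some k := by
  have hcm : c ∈ l := hc ▸ List.getElem_mem hk
  obtain ⟨k2, hk2⟩ := Option.isSome_iff_exists.mp ((PySem.List.index?_isSome_iff l c).mpr hcm)
  obtain ⟨hk2l, hk2c, hmin2⟩ := PySem.List.getElem_of_index?_eq_some hk2
  have h1 : ¬ (k2 < k) := fun hlt => hmin k2 hk2l hlt hk2c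
  have h2 : ¬ (k < k2) := fun hlt => hmin2 k hlt hc
  have : k2 = k := by omega
  rw [hk2, this]

-- A's distance when a next occurrence q > pt exists in s
lemma dA_eq_of_next (s : List Char) (pt q : Nat) (c : Char) (hpt : pt < s.length)
    (hq : q < s.length) (hqc : s[q]'hq = c) (hgt : pt < q)
    (hleast : ∀ i (h : i < s.length), pt < i → s[i]'h = c → q ≤ i) :
    dA s pt c = (q : Int) - (pt : Int) := by
  unfold dA
  rw [List.drop_append_of_le_length (by omega)]
  have hql : q - (pt + 1) < (s.drop (pt + 1)).length := by
    rw [List.length_drop]; omega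
  have hqget : (s.drop (pt + 1))[q - (pt + 1)]'hql = c := by
    rw [List.getElem_drop]
    have heq : pt + 1 + (q - (pt + 1)) = q := by omega
    simp only [heq]; exact hqc
  have hmem : c ∈ s.drop (pt + 1) := hqget ▸ List.getElem_mem hql
  rw [PySem.List.index?_append_of_mem _ hmem]
  have hidx : PySem.List.index? (s.drop (pt + 1)) c = some (q - (pt + 1)) := by
    apply index?_eq_some_of_first _ _ _ hql hqget
    intro j hj hjk hcon
    rw [List.getElem_drop] at hcon
    have := hleast (pt + 1 + j) (by rw [List.length_drop] at hj; omega) (by omega) hcon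
    omega
  rw [hidx]
  simp only [Option.getD_some]
  omega

-- A's distance when no occurrence of c after pt exists: wrap to the first occurrence
lemma dA_eq_of_wrap (s : List Char) (pt : Nat) (c : Char) (hpt : pt < s.length) (hc : c ∈ s)
    (hnone : ∀ i (h : i < s.length), pt < i → s[i]'h ≠ c) :
    dA s pt c = (s.length : Int) - (pt : Int) + ((occ s c).headD 0 : Int) := by
  unfold dA
  rw [List.drop_append_of_le_length (by omega)]
  have hnot : c ∉ s.drop (pt + 1) := by
    intro hmem
    obtain ⟨j, hj, hjc⟩ := List.mem_iff_getElem.mp hmem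
    rw [List.getElem_drop] at hjc
    exact hnone (pt + 1 + j) (by rw [List.length_drop] at hj; omega) (by omega) hjc
  rw [index?_append_of_not_mem _ hnot]
  have hsome : (PySem.List.index? s c).isSome := (PySem.List.index?_isSome_iff s c).mpr hc
  obtain ⟨k, hk⟩ := Option.isSome_iff_exists.mp hsome
  have hhead : k = (occ s c).headD 0 := by
    have hgd := index?_getD_eq_head_occ s c hc
    rw [hk] at hgd; simpa using hgd
  obtain ⟨hklt, -, -⟩ := PySem.List.getElem_of_index?_eq_some hk
  rw [hk]
  simp only [Option.map_some, Option.getD_some, List.length_drop]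
  rw [← hhead]
  push_cast
  omega

lemma dA_pos (s : List Char) (pt : Nat) (c : Char) : 1 ≤ dA s pt c := by
  unfold dA
  have h0 : (0 : Int) ≤ ((PySem.List.index? ((s ++ s).drop (pt + 1)) c).getD 0 : Int) :=
    Int.natCast_nonneg _
  omega

-- B's loop body equals stepP
lemma stepB_eq (s : List Char) (pt : Nat) (ans : Int) (c : Char)
    (hpt : pt < s.length) (hc : c ∈ s) :
    (let lst := (buildPos s).getD c []
     let k := bsearchGT lst pt 0 lst.length
     if k < lst.length then
       (lst.getD k 0, ans + ((lst.getD k 0 : Int) - (pt : Int)))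
     else
       (lst.headD 0, ans + ((s.length : Int) - (pt : Int) + (lst.headD 0 : Int)))) =
    stepP s (pt, ans) c := by
  simp only [getD_buildPos]
  obtain ⟨-, hkle, hbelow, habove⟩ := bsearchGT_spec (occ s c) pt (occ_getD_mono s c)
    (occ s c).length 0 (occ s c).length (by omega) (Nat.zero_le _) (le_refl _)
    (fun i h => absurd h (Nat.not_lt_zero i)) (fun i h1 h2 => absurd h2 (by omega))
  by_cases hk : bsearchGT (occ s c) pt 0 (occ s c).length < (occ s c).length
  · simp only [if_pos hk]
    set k := bsearchGT (occ s c) pt 0 (occ s c).length with hkdef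
    have hqmem : (occ s c).getD k 0 ∈ occ s c := by
      rw [List.getD_eq_getElem _ _ hk]; exact List.getElem_mem hk
    obtain ⟨hqlt, hqc⟩ := (mem_occ s c _).mp hqmem
    have hqgt : pt < (occ s c).getD k 0 := habove k (le_refl _) hk
    have hleast : ∀ i (h : i < s.length), pt < i → s[i]'h = c → (occ s c).getD k 0 ≤ i := by
      intro i h hgt hic
      obtain ⟨m, hm, hmi⟩ := List.mem_iff_getElem.mp ((mem_occ s c i).mpr ⟨h, hic⟩)
      have hmget : (occ s c).getD m 0 = i := by rw [List.getD_eq_getElem _ _ hm]; exact hmi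
      have hkm : k ≤ m := by
        by_contra hcon
        have := hbelow m (by omega)
        omega
      have := occ_getD_mono s c k m hkm hm
      omega
    have hdA := dA_eq_of_next s pt ((occ s c).getD k 0) c hpt hqlt hqc hqgt hleast
    unfold stepP
    simp only [hdA]
    have htn : ((occ s c).getD k 0 : Int) - (pt : Int)
        = (((occ s c).getD k 0 - pt : Nat) : Int) := by omega
    refine Prod.ext ?_ (by simp)
    simp only [htn, Int.toNat_natCast]
    have hadd : pt + ((occ s c).getD k 0 - pt) = (occ s c).getD k 0 := by omega
    rw [hadd, Nat.mod_eq_of_lt hqlt]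
  · simp only [if_neg hk]
    have hkeq : bsearchGT (occ s c) pt 0 (occ s c).length = (occ s c).length := by omega
    have hnone : ∀ i (h : i < s.length), pt < i → s[i]'h ≠ c := by
      intro i h hgt hic
      obtain ⟨m, hm, hmi⟩ := List.mem_iff_getElem.mp ((mem_occ s c i).mpr ⟨h, hic⟩)
      have := hbelow m (by omega)
      rw [List.getD_eq_getElem _ _ hm, hmi] at this
      omega
    have hdA := dA_eq_of_wrap s pt c hpt hc hnone
    obtain ⟨hhl, -⟩ := (mem_occ s c _).mp (occ_head_mem s c hc)
    unfold stepP
    simp only [hdA]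
    have htn : (s.length : Int) - (pt : Int) + ((occ s c).headD 0 : Int)
        = ((s.length - pt + (occ s c).headD 0 : Nat) : Int) := by push_cast; omega
    refine Prod.ext ?_ (by simp)
    simp only [htn, Int.toNat_natCast]
    have hadd : pt + (s.length - pt + (occ s c).headD 0)
        = s.length + (occ s c).headD 0 := by omega
    rw [hadd, Nat.add_mod_left, Nat.mod_eq_of_lt hhl]

lemma stepP_fst_lt (s : List Char) (st : Nat × Int) (c : Char) (h : 0 < s.length) :
    (stepP s st c).1 < s.length := by
  unfold stepP
  exact Nat.mod_lt _ h

-- B's fold equals the fold of stepP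
lemma foldB_eq (s : List Char) (cs : List Char) :
    ∀ (pt : Nat) (ans : Int), pt < s.length → (∀ c ∈ cs, c ∈ s) →
    cs.foldl (fun (st : Nat × Int) c =>
        let lst := (buildPos s).getD c []
        let k := bsearchGT lst st.1 0 lst.length
        if k < lst.length then
          (lst.getD k 0, st.2 + ((lst.getD k 0 : Int) - (st.1 : Int)))
        else
          (lst.headD 0, st.2 + ((s.length : Int) - (st.1 : Int) + (lst.headD 0 : Int)))) (pt, ans)
      = cs.foldl (stepP s) (pt, ans) := by
  induction cs with
  | nil => intro pt ans _ _; rfl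
  | cons c cs ih =>
    intro pt ans hpt hsub
    have hstep := stepB_eq s pt ans c hpt (hsub c (List.mem_cons_self ..))
    have hlt := stepP_fst_lt s (pt, ans) c (by omega)
    have hmain := ih (stepP s (pt, ans) c).1 (stepP s (pt, ans) c).2 hlt
      (fun x hx => hsub x (List.mem_cons_of_mem _ hx))
    rw [List.foldl_cons, List.foldl_cons]
    exact Eq.trans (congrArg (fun z => List.foldl (fun (st : Nat × Int) c =>
        let lst := (buildPos s).getD c []
        let k := bsearchGT lst st.1 0 lst.length
        if k < lst.length then
          (lst.getD k 0, st.2 + ((lst.getD k 0 : Int) - (st.1 : Int)))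
        else
          (lst.headD 0, st.2 + ((s.length : Int) - (st.1 : Int) + (lst.headD 0 : Int)))) z cs) hstep) hmain

-- ---- A side ----

-- A's memo-table invariant: each entry is -1 or the true distance
def InvA (s t : List Char) (dis : List (List Int)) : Prop :=
  dis.length = s.length ∧ ∀ i, i < s.length →
    (dis.getD i []).length = (PySem.Set.ofList t).length ∧
    ∀ j, j < (PySem.Set.ofList t).length →
      (dis.getD i []).getD j (-1) = -1 ∨
      (dis.getD i []).getD j (-1) = dA s i ((PySem.Set.ofList t).getD j ' ')

lemma alp2num_getD (t : List Char) (c : Char) (hc : c ∈ t) :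
    (PySem.Dict.ofList ((PySem.Set.ofList t).map
        (fun c => (c, (PySem.List.index? (PySem.Set.ofList t) c).getD 0)))).getD c 0 =
      (PySem.List.index? (PySem.Set.ofList t) c).getD 0 := by
  have hmem : c ∈ PySem.Set.ofList t := (PySem.Set.mem_ofList t c).mpr hc
  have hnd : (PySem.Set.ofList t).Nodup := PySem.Set.nodup_ofList t
  have hfold : (PySem.Dict.ofList ((PySem.Set.ofList t).map
      (fun c => (c, (PySem.List.index? (PySem.Set.ofList t) c).getD 0))))
      = (PySem.Set.ofList t).foldl
          (fun d a => d.insert a ((PySem.List.index? (PySem.Set.ofList t) a).getD 0))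
          PySem.Dict.empty := by
    rw [show (PySem.Dict.ofList ((PySem.Set.ofList t).map
        (fun c => (c, (PySem.List.index? (PySem.Set.ofList t) c).getD 0))))
      = ((PySem.Set.ofList t).map
          (fun c => (c, (PySem.List.index? (PySem.Set.ofList t) c).getD 0))).foldl
          (fun d p => d.insert p.1 p.2) PySem.Dict.empty from rfl, List.foldl_map]
  rw [hfold]
  have hitems := PySem.Dict.items_foldl_insert_fresh (PySem.Set.ofList t) (fun a => a)
    (fun a => (PySem.List.index? (PySem.Set.ofList t) a).getD 0) PySem.Dict.empty
    (fun a _ => PySem.Dict.contains_empty a) (by simpa using hnd)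
  apply PySem.Dict.getD_of_mem_items
  · rw [hitems]
    exact List.mem_append_right _ (List.mem_map.mpr ⟨c, hmem, rfl⟩)
  · exact PySem.Dict.nodup_keys_foldl_insert _ _ _ PySem.Dict.nodup_keys_empty

lemma it_spec (t : List Char) (c : Char) (hc : c ∈ t) :
    ∃ h : (PySem.List.index? (PySem.Set.ofList t) c).getD 0 < (PySem.Set.ofList t).length,
      (PySem.Set.ofList t).getD ((PySem.List.index? (PySem.Set.ofList t) c).getD 0) ' ' = c := by
  have hmem : c ∈ PySem.Set.ofList t := (PySem.Set.mem_ofList t c).mpr hc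
  have hsome : (PySem.List.index? (PySem.Set.ofList t) c).isSome :=
    (PySem.List.index?_isSome_iff _ c).mpr hmem
  obtain ⟨k, hk⟩ := Option.isSome_iff_exists.mp hsome
  obtain ⟨hklt, hkc, -⟩ := PySem.List.getElem_of_index?_eq_some hk
  rw [hk]
  simp only [Option.getD_some]
  exact ⟨hklt, by rw [List.getD_eq_getElem _ _ hklt]; exact hkc⟩


lemma contains_buildPos (s : List Char) (c : Char) :
    ((buildPos s).contains c = true) ↔ c ∈ s := by
  rw [PySem.Dict.contains_iff_mem_keys]
  unfold buildPos
  rw [PySem.Dict.keys_foldl_modify_key s.zipIdx (fun p => p.1) []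
    (fun d p => fun l => l ++ [p.2]) PySem.Dict.empty]
  rw [PySem.Dict.keys_empty, PySem.Set.update_nil_left]
  rw [show s.zipIdx.map (fun p => p.1) = s from List.zipIdx_map_fst 0 s]
  exact PySem.Set.mem_ofList s c

lemma set_contains_false_iff (s : List Char) (c : Char) :
    (PySem.Set.contains (PySem.Set.ofList s) c = false) ↔ c ∉ s := by
  constructor
  · intro h hmem
    have hb : List.contains (PySem.Set.ofList s) c = true :=
      List.contains_iff_mem.mpr ((PySem.Set.mem_ofList s c).mpr hmem)
    have h' : List.contains (PySem.Set.ofList s) c = false := h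
    rw [hb] at h'
    cases h'
  · intro h
    cases hb : PySem.Set.contains (PySem.Set.ofList s) c
    · rfl
    · have hb' : List.contains (PySem.Set.ofList s) c = true := hb
      exact absurd ((PySem.Set.mem_ofList s c).mp (List.contains_iff_mem.mp hb')) h

lemma buildPos_contains_false_iff (s : List Char) (c : Char) :
    ((buildPos s).contains c = false) ↔ c ∉ s := by
  constructor
  · intro h hmem
    exact absurd ((contains_buildPos s c).mpr hmem) (by simp [h])
  · intro h
    cases hb : (buildPos s).contains c
    · rfl
    · exact absurd ((contains_buildPos s c).mp hb) h

lemma InvA_init (s t : List Char) :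
    InvA s t (List.replicate s.length (List.replicate (PySem.Set.ofList t).length (-1))) := by
  constructor
  · exact List.length_replicate
  · intro i hi
    have hget : (List.replicate s.length (List.replicate (PySem.Set.ofList t).length (-1 : Int))).getD i []
        = List.replicate (PySem.Set.ofList t).length (-1 : Int) := by
      rw [List.getD_eq_getElem _ _ (by simpa using hi), List.getElem_replicate]
    rw [hget]
    refine ⟨List.length_replicate, ?_⟩
    intro j hj
    left
    rw [List.getD_eq_getElem _ _ (by simpa using hj), List.getElem_replicate]

lemma index?_getD_lt (s : List Char) (c : Char) (hc : c ∈ s) :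
    (PySem.List.index? s c).getD 0 < s.length := by
  obtain ⟨k, hk⟩ := Option.isSome_iff_exists.mp ((PySem.List.index?_isSome_iff s c).mpr hc)
  obtain ⟨hklt, -, -⟩ := PySem.List.getElem_of_index?_eq_some hk
  rw [hk]; simpa using hklt

lemma foldA_eq (s t : List Char) (cs : List Char) :
    ∀ (dis : List (List Int)) (pt : Nat) (ans : Int),
    InvA s t dis → pt < s.length → (∀ c ∈ cs, c ∈ t) →
    ((cs.foldl (fun (st : List (List Int) × Nat × Int) c =>
        let it : Nat := (PySem.Dict.ofList ((PySem.Set.ofList t).map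
          (fun c => (c, (PySem.List.index? (PySem.Set.ofList t) c).getD 0)))).getD c 0
        let row := st.1.getD st.2.1 []
        let d0 := row.getD it (-1)
        let d : Int := if d0 == -1 then
            ((PySem.List.index? ((s ++ s).drop (st.2.1 + 1)) c).getD 0 : Int) + 1 else d0
        (st.1.set st.2.1 (row.set it d), (st.2.1 + d.toNat) % s.length, st.2.2 + d))
      (dis, pt, ans)).2 = cs.foldl (stepP s) (pt, ans)) := by
  induction cs with
  | nil => intro dis pt ans _ _ _; rfl
  | cons c cs ih =>
    intro dis pt ans hinv hpt hsub
    have hct : c ∈ t := hsub c (List.mem_cons_self ..)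
    have halp := alp2num_getD t c hct
    obtain ⟨hitlt, hitc⟩ := it_spec t c hct
    obtain ⟨hlen, hrows⟩ := hinv
    obtain ⟨hrowlen, hentries⟩ := hrows pt hpt
    rw [List.foldl_cons, List.foldl_cons]
    have hd : (if ((dis.getD pt []).getD ((PySem.List.index? (PySem.Set.ofList t) c).getD 0) (-1)) == -1
        then ((PySem.List.index? ((s ++ s).drop (pt + 1)) c).getD 0 : Int) + 1
        else (dis.getD pt []).getD ((PySem.List.index? (PySem.Set.ofList t) c).getD 0) (-1))
        = dA s pt c := by
      rcases hentries _ hitlt with h | h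
      · rw [h]; simp [dA]
      · rw [hitc] at h
        have hne : (dis.getD pt []).getD ((PySem.List.index? (PySem.Set.ofList t) c).getD 0) (-1) ≠ -1 := by
          have := dA_pos s pt c; omega
        rw [show ((dis.getD pt []).getD ((PySem.List.index? (PySem.Set.ofList t) c).getD 0) (-1) == -1) = false
          from beq_eq_false_iff_ne.mpr hne]
        simpa using h
    have happ : (fun (st : List (List Int) × Nat × Int) c =>
        let it : Nat := (PySem.Dict.ofList ((PySem.Set.ofList t).map
          (fun c => (c, (PySem.List.index? (PySem.Set.ofList t) c).getD 0)))).getD c 0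
        let row := st.1.getD st.2.1 []
        let d0 := row.getD it (-1)
        let d : Int := if d0 == -1 then
            ((PySem.List.index? ((s ++ s).drop (st.2.1 + 1)) c).getD 0 : Int) + 1 else d0
        (st.1.set st.2.1 (row.set it d), (st.2.1 + d.toNat) % s.length, st.2.2 + d)) (dis, pt, ans) c
        = (dis.set pt ((dis.getD pt []).set ((PySem.List.index? (PySem.Set.ofList t) c).getD 0) (dA s pt c)),
           (pt + (dA s pt c).toNat) % s.length, ans + dA s pt c) := by
      simp only [halp, hd]
    have hinv' : InvA s t (dis.set pt ((dis.getD pt []).set ((PySem.List.index? (PySem.Set.ofList t) c).getD 0) (dA s pt c))) := by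
      constructor
      · rw [List.length_set]; exact hlen
      · intro i hi
        have hi' : i < (dis.set pt ((dis.getD pt []).set ((PySem.List.index? (PySem.Set.ofList t) c).getD 0) (dA s pt c))).length := by
          rw [List.length_set]; omega
        by_cases hip : i = pt
        · subst hip
          have hget : (dis.set i ((dis.getD i []).set ((PySem.List.index? (PySem.Set.ofList t) c).getD 0) (dA s i c))).getD i []
              = (dis.getD i []).set ((PySem.List.index? (PySem.Set.ofList t) c).getD 0) (dA s i c) := by
            rw [List.getD_eq_getElem _ _ hi', List.getElem_set, if_pos rfl]
          rw [hget]
          refine ⟨by rw [List.length_set]; exact hrowlen, ?_⟩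
          intro j hj
          have hjrow : j < (dis.getD i []).length := by omega
          by_cases hji : j = (PySem.List.index? (PySem.Set.ofList t) c).getD 0
          · subst hji
            right
            rw [List.getD_eq_getElem _ _ (by rw [List.length_set]; exact hjrow),
              List.getElem_set, if_pos rfl, hitc]
          · have hne : ((dis.getD i []).set ((PySem.List.index? (PySem.Set.ofList t) c).getD 0) (dA s i c)).getD j (-1)
                = (dis.getD i []).getD j (-1) := by
              rw [List.getD_eq_getElem _ _ (by rw [List.length_set]; exact hjrow),
                List.getElem_set, if_neg (fun hcon => hji hcon.symm), List.getD_eq_getElem _ _ hjrow]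
            rw [hne]
            exact hentries j hj
        · have hget : (dis.set pt ((dis.getD pt []).set ((PySem.List.index? (PySem.Set.ofList t) c).getD 0) (dA s pt c))).getD i []
              = dis.getD i [] := by
            rw [List.getD_eq_getElem _ _ hi', List.getElem_set, if_neg (fun hcon => hip hcon.symm),
              ← List.getD_eq_getElem dis [] (by omega)]
          rw [hget]
          exact hrows i hi
    have hmain := ih (dis.set pt ((dis.getD pt []).set ((PySem.List.index? (PySem.Set.ofList t) c).getD 0) (dA s pt c)))
      ((pt + (dA s pt c).toNat) % s.length) (ans + dA s pt c) hinv'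
      (Nat.mod_lt _ (by omega)) (fun x hx => hsub x (List.mem_cons_of_mem _ hx))
    exact Eq.trans (congrArg (fun z => (List.foldl (fun (st : List (List Int) × Nat × Int) c =>
        let it : Nat := (PySem.Dict.ofList ((PySem.Set.ofList t).map
          (fun c => (c, (PySem.List.index? (PySem.Set.ofList t) c).getD 0)))).getD c 0
        let row := st.1.getD st.2.1 []
        let d0 := row.getD it (-1)
        let d : Int := if d0 == -1 then
            ((PySem.List.index? ((s ++ s).drop (st.2.1 + 1)) c).getD 0 : Int) + 1 else d0
        (st.1.set st.2.1 (row.set it d), (st.2.1 + d.toNat) % s.length, st.2.2 + d)) z cs).2) happ) hmain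

-- ===== VERDICT (by name: the statement is the Claim_ definition above) =====
theorem func_spec : Claim_equal_func := by
  unfold Claim_equal_func
  intro S T _ hpre
  unfold Spec_func func func_alt
  simp only []
  have hT : T.toList ≠ [] := by simpa [String.toList_eq_nil_iff] using hpre
  have hcond : ((PySem.Set.ofList T.toList).any fun c => !PySem.Set.contains (PySem.Set.ofList S.toList) c)
      = (T.toList.any fun c => !(buildPos S.toList).contains c) := by
    rw [Bool.eq_iff_iff]
    simp only [List.any_eq_true, Bool.not_eq_true']
    constructor
    · rintro ⟨c, hc, hnc⟩
      exact ⟨c, (PySem.Set.mem_ofList _ _).mp hc,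
        (buildPos_contains_false_iff _ _).mpr ((set_contains_false_iff _ _).mp hnc)⟩
    · rintro ⟨c, hc, hnc⟩
      exact ⟨c, (PySem.Set.mem_ofList _ _).mpr hc,
        (set_contains_false_iff _ _).mpr ((buildPos_contains_false_iff _ _).mp hnc)⟩
  rw [hcond]
  by_cases hany : (T.toList.any fun c => !(buildPos S.toList).contains c) = true
  · rw [if_pos hany, if_pos hany]
  · rw [if_neg hany, if_neg hany]
    have hall : ∀ c ∈ T.toList, c ∈ S.toList := by
      intro c hcm
      by_contra hnm
      exact hany (List.any_eq_true.mpr ⟨c, hcm,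
        by simp [(buildPos_contains_false_iff _ _).mpr hnm]⟩)
    cases ht : T.toList with
    | nil => exact absurd ht hT
    | cons c0 rest =>
      rw [ht] at hall
      have hc0s : c0 ∈ S.toList := hall c0 (List.mem_cons_self ..)
      simp only [List.headD_cons, List.drop_one, List.tail_cons]
      have hpt0 : (PySem.List.index? S.toList c0).getD 0
          = ((buildPos S.toList).getD c0 []).headD 0 := by
        rw [getD_buildPos]
        exact index?_getD_eq_head_occ S.toList c0 hc0s
      have hpt0lt : (PySem.List.index? S.toList c0).getD 0 < S.toList.length :=
        index?_getD_lt S.toList c0 hc0s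
      have hptBlt : ((buildPos S.toList).getD c0 []).headD 0 < S.toList.length := hpt0 ▸ hpt0lt
      have hA := foldA_eq S.toList (c0 :: rest) rest
        (List.replicate S.toList.length (List.replicate (PySem.Set.ofList (c0 :: rest)).length (-1)))
        ((PySem.List.index? S.toList c0).getD 0)
        (((PySem.List.index? S.toList c0).getD 0 : Int) + 1)
        (InvA_init S.toList (c0 :: rest)) hpt0lt
        (fun x hx => List.mem_cons_of_mem c0 hx)
      have hB := foldB_eq S.toList rest
        (((buildPos S.toList).getD c0 []).headD 0)
        ((((buildPos S.toList).getD c0 []).headD 0 : Int) + 1)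
        hptBlt (fun x hx => hall x (List.mem_cons_of_mem c0 hx))
      have hmid : (List.foldl (stepP S.toList)
            ((PySem.List.index? S.toList c0).getD 0,
             ((PySem.List.index? S.toList c0).getD 0 : Int) + 1) rest).2
          = (List.foldl (stepP S.toList)
            (((buildPos S.toList).getD c0 []).headD 0,
             (((buildPos S.toList).getD c0 []).headD 0 : Int) + 1) rest).2 := by
        rw [hpt0]
      exact Eq.trans (congrArg Prod.snd hA) (Eq.trans hmid (congrArg Prod.snd hB).symm)
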